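-- pv_equiv track=rewrite | github.com/jurijw/2048 | board.py | collapsible
-- ===== SOURCE A (Python) =====
-- def collapsible(lst: list[int]) -> bool:
--     """Returns True iff a list of integers is collapsible. That is,
--     performing the collapse algorithm on it would result in a change.
--     We check for collapsibility by traversing the list, checking if
--     any subsequent entries are equal, and tracking if zero and non-zero
--     entries have been observed. This algorithm runs in O(n) time complexity.
--     """
--     found_zero = False
--     found_non_zero = False
--     for i in range(len(lst) - 1):
--         v1, v2 = lst[i], lst[i + 1]
--         if v1 != 0 and v1 == v2:
--             return True
--         if v1 == 0 or v2 == 0: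
--             found_zero = True
--         if v1 != 0 or v2 != 0:
--             found_non_zero = True
--     return found_zero and found_non_zero
-- ===== SOURCE B (Python) =====
-- def collapsible(lst: list[int]) -> bool:
--     has_zero = any(x == 0 for x in lst)
--     has_non_zero = any(x != 0 for x in lst)
--     has_merge = any(a != 0 and a == b for a, b in zip(lst, lst[1:]))
--     return has_merge or (has_zero and has_non_zero)
-- ===== Notes on version B (the rewrite author's own statement) =====
-- stated objective: simpler
-- what changed: Replaces the fused early-exit loop tracking three flags with three independent whole-list scans (any zero, any non-zero, any mergeable adjacent pair) combined by one boolean formula.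
import Mathlib
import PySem

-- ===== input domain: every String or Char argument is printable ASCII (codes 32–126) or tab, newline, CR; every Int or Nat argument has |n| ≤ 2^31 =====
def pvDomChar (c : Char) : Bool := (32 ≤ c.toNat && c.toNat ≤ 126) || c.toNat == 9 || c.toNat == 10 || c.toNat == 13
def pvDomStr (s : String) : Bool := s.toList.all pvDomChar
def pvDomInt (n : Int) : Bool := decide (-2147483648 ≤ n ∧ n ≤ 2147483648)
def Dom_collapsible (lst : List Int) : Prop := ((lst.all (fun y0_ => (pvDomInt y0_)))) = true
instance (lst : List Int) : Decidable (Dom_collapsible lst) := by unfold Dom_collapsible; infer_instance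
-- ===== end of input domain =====

-- B replaces A's fused early-exit loop (three flags in one pass) by three independent scans
-- combined by a boolean formula; objective: simpler.

-- ===== PORT A =====
-- A's loop walks i over range(len-1) reading lst[i], lst[i+1]; ported as structural
-- recursion consuming the list pairwise with the same two accumulator flags and early return.
def collapsibleGo : List Int → Bool → Bool → Bool
  | v1 :: v2 :: rest, fz, fnz =>
      if v1 ≠ 0 ∧ v1 = v2 then true
      else collapsibleGo (v2 :: rest)
        (if v1 = 0 ∨ v2 = 0 then true else fz)
        (if v1 ≠ 0 ∨ v2 ≠ 0 then true else fnz)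
  | _, fz, fnz => fz && fnz

def collapsible (lst : List Int) : Bool := collapsibleGo lst false false

-- ===== PORT B =====
def collapsible_alt (lst : List Int) : Bool :=
  let has_zero := lst.any (fun x => x == 0)
  let has_non_zero := lst.any (fun x => x != 0)
  let has_merge := (lst.zip (lst.drop 1)).any (fun p => p.1 != 0 && p.1 == p.2)
  has_merge || (has_zero && has_non_zero)

-- ===== PRECONDITION & SPEC =====
def Spec_collapsible (lst : List Int) (out : Bool) : Prop := out = collapsible_alt lst
instance (lst : List Int) (out : Bool) : Decidable (Spec_collapsible lst out) := by unfold Spec_collapsible; infer_instance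

-- ===== CLAIM (what is proved, stated in full; the proofs are below) =====
def Claim_equal_collapsible : Prop := ∀ (lst : List Int), Dom_collapsible lst → Spec_collapsible lst (collapsible lst)

-- ===== LEMMAS AND PROOFS =====
theorem collapsibleGo_eq (v1 v2 : Int) (l : List Int) (fz fnz : Bool) :
    collapsibleGo (v1 :: v2 :: l) fz fnz =
      (((v1 :: v2 :: l).zip (v2 :: l)).any (fun p => p.1 != 0 && p.1 == p.2) ||
        ((fz || (v1 :: v2 :: l).any (fun x => x == 0)) &&
         (fnz || (v1 :: v2 :: l).any (fun x => x != 0)))) := by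
  induction l generalizing v1 v2 fz fnz with
  | nil =>
      simp only [collapsibleGo, List.zip, List.zipWith, List.any_cons, List.any_nil]
      rw [Bool.eq_iff_iff]
      simp only [Bool.or_eq_true, Bool.and_eq_true, bne_iff_ne, beq_iff_eq,
        Bool.ite_eq_true_distrib, if_true_left]
      tauto
  | cons x xs ih =>
      conv_lhs => rw [collapsibleGo]
      by_cases hm : v1 ≠ 0 ∧ v1 = v2
      · obtain ⟨h0, he⟩ := hm
        subst he
        simp [h0]
      · rw [if_neg hm, ih]
        rw [Bool.eq_iff_iff]
        simp only [List.zip, List.zipWith, List.any_cons, Bool.or_eq_true, Bool.and_eq_true,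
          bne_iff_ne, beq_iff_eq, Bool.ite_eq_true_distrib, if_true_left]
        generalize (List.zipWith Prod.mk (x :: xs) xs).any (fun p => p.1 != 0 && p.1 == p.2) = m
        generalize hz : (xs.any fun y => y == 0) = az
        generalize hn : (xs.any fun y => y != 0) = an
        by_cases h1 : v1 = 0 <;> by_cases h2 : v2 = 0 <;> simp_all

-- ===== VERDICT (by name: the statement is the Claim_ definition above) =====
theorem collapsible_spec : Claim_equal_collapsible := by
  intro lst _
  unfold Spec_collapsible collapsible collapsible_alt
  match lst with
  | [] => rfl
  | [v] =>
      by_cases h : v = 0 <;> simp [collapsibleGo, h]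
  | v1 :: v2 :: l =>
      rw [collapsibleGo_eq]
      simp
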